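-- pv_equiv track=rewrite | github.com/Algorithm-Study-CodeRelay/algorithm-study | daewook/2025-09-12_programmers_유연근무제.py | solution
-- ===== SOURCE A (Python) =====
-- def solution(schedules, timelogs, startday):
--
--     # 상품받는 직원 수
--     answer = 0
--
--     # 참가자 수
--     person = len(schedules)
--
--     # 직원수 계산
--     for i in range(person):
--         day = startday
--         check = 0
--         expected = (schedules[i] // 100 * 60) + (schedules[i] % 100)
--
--         for real_time in timelogs[i]:
--
--             # 주말인 경우 판단 X
--             if day == 6 or day == 7:
--                 day += 1
--                 continue
--
--             # 분 차이 계산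
--             real_min = (real_time // 100 * 60) + (real_time % 100)
--             diff = real_min - expected
--
--             day += 1
--             if diff > 10:
--                 break
--
--             check += 1
--             # 평일 기준 5일 모두 통과하면, answer 추가
--             if check == 5:
--                 answer += 1
--
--     return answer
-- ===== SOURCE B (Python) =====
-- def solution(schedules, timelogs, startday):
--     # In A the day counter at the j-th entry is always startday + j, so the skipped
--     # (weekend) positions are the fixed indices 6 - startday and 7 - startday.
--     # Precompute once the five relevant indices; per person only those five entries
--     # are inspected (no scan of the whole timelog).
--     idxs = [j for j in range(7) if j != 6 - startday and j != 7 - startday][:5]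
--     last = idxs[-1]
--     answer = 0
--     for sched, logs in zip(schedules, timelogs):
--         if last >= len(logs):
--             continue
--         expected = (sched // 100) * 60 + sched % 100
--         if all((logs[j] // 100) * 60 + logs[j] % 100 - expected <= 10 for j in idxs):
--             answer += 1
--     return answer
-- ===== Notes on version B (the rewrite author's own statement) =====
-- stated objective: alternative
-- what changed: B replaces A's per-entry day-counter scan (with break and check==5 counting) by a closed-form index computation: since the day at entry j is always startday + j, the skipped weekend positions are the fixed indices 6-startday and 7-startday, so B precomputes the five relevant indices once and per person only tests those five entries directly.
import Mathlib
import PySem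

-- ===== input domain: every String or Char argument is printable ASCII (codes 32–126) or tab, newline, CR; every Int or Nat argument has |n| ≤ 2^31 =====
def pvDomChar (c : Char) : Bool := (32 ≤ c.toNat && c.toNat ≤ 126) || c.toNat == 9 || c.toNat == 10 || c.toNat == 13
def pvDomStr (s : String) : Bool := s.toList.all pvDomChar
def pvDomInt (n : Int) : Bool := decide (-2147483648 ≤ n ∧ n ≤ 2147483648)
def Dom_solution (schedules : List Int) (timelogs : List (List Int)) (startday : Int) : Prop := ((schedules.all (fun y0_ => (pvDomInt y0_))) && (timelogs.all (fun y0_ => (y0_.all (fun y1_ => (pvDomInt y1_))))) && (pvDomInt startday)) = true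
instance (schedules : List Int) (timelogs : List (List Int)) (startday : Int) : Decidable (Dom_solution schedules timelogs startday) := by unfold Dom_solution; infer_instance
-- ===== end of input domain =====

-- B computes the five relevant weekday indices in closed form (day at entry j is startday + j, so weekends sit at the fixed indices 6-startday, 7-startday) and per person only inspects those five entries, instead of A's day-counter scan over every entry with break/check==5 (objective: alternative).


-- ===== PORT A =====
-- inner 'for real_time in timelogs[i]' loop of A, with its break (returning answer) and continue
def solInnerA (expected : Int) : List Int → Int → Int → Int → Int
  | [], _, _, answer => answer
  | t :: ts, day, check, answer =>
    if day = 6 ∨ day = 7 then solInnerA expected ts (day + 1) check answer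
    else
      let realMin := PySem.Int.floordiv t 100 * 60 + PySem.Int.mod t 100
      let diff := realMin - expected
      if diff > 10 then answer
      else
        let check' := check + 1
        let answer' := if check' = 5 then answer + 1 else answer
        solInnerA expected ts (day + 1) check' answer'

def solution (schedules : List Int) (timelogs : List (List Int)) (startday : Int) : Int :=
  (List.range schedules.length).foldl (fun answer i =>
    let s := (PySem.List.pyGet? schedules (Int.ofNat i)).getD 0       -- in range for i < len(schedules)
    let logs := (PySem.List.pyGet? timelogs (Int.ofNat i)).getD []    -- IndexError when timelogs is shorter: excluded by Pre_solution
    let expected := PySem.Int.floordiv s 100 * 60 + PySem.Int.mod s 100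
    solInnerA expected logs startday 0 answer) 0

-- ===== PORT B =====
-- [j for j in range(7) if j != 6 - startday and j != 7 - startday][:5]
def weekdayIdxs (startday : Int) : List Int :=
  ((PySem.List.pyRange 0 7 1).filter
      (fun j => decide (j ≠ 6 - startday ∧ j ≠ 7 - startday))).take 5

def solution_alt (schedules : List Int) (timelogs : List (List Int)) (startday : Int) : Int :=
  let idxs := weekdayIdxs startday
  let last := (PySem.List.pyGet? idxs (-1)).getD 0        -- idxs always has 5 elements, so idxs[-1] never raises
  (schedules.zip timelogs).foldl (fun answer p =>
    if last ≥ (p.2.length : Int) then answer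
    else
      let expected := PySem.Int.floordiv p.1 100 * 60 + PySem.Int.mod p.1 100
      if idxs.all (fun j =>
          decide (PySem.Int.floordiv ((PySem.List.pyGet? p.2 j).getD 0) 100 * 60
            + PySem.Int.mod ((PySem.List.pyGet? p.2 j).getD 0) 100 - expected ≤ 10))
      then answer + 1 else answer) 0

-- ===== PRECONDITION & SPEC =====
-- A indexes timelogs[i] for every i < len(schedules); a shorter timelogs raises IndexError.
def Pre_solution (schedules : List Int) (timelogs : List (List Int)) (startday : Int) : Prop :=
  schedules.length ≤ timelogs.length
instance (schedules : List Int) (timelogs : List (List Int)) (startday : Int) : Decidable (Pre_solution schedules timelogs startday) := by unfold Pre_solution; infer_instance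
def pvWitness_solution : List Int × List (List Int) × Int := ([900, 930], [[905, 900, 901, 902, 903, 910], [800]], 3)

def Spec_solution (schedules : List Int) (timelogs : List (List Int)) (startday : Int) (out : Int) : Prop := out = solution_alt schedules timelogs startday
instance (schedules : List Int) (timelogs : List (List Int)) (startday : Int) (out : Int) : Decidable (Spec_solution schedules timelogs startday out) := by unfold Spec_solution; infer_instance

-- ===== CLAIM (what is proved, stated in full; the proofs are below) =====
def Claim_equal_solution : Prop := ∀ (schedules : List Int) (timelogs : List (List Int)) (startday : Int), Dom_solution schedules timelogs startday → Pre_solution schedules timelogs startday → Spec_solution schedules timelogs startday (solution schedules timelogs startday)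

-- ===== LEMMAS AND PROOFS =====

lemma fd100 (t : Int) : PySem.Int.floordiv t 100 = t / 100 :=
  PySem.Int.floordiv_eq_ediv_of_pos (by norm_num)
lemma md100 (t : Int) : PySem.Int.mod t 100 = t % 100 :=
  PySem.Int.mod_eq_emod_of_pos (by norm_num)

-- the weekday arrival list A effectively traverses (proof-side abstraction of A's day counter)
def weekdaysB (logs : List Int) (startday : Int) : List Int :=
  (PySem.List.enumerate logs startday).filterMap
    (fun p => if p.1 ≠ 6 ∧ p.1 ≠ 7 then some p.2 else none)

-- day-free version of A's inner loop, over the already-filtered weekday list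
def solInnerA' (expected : Int) : List Int → Int → Int → Int
  | [], _, answer => answer
  | t :: ts, check, answer =>
    if t / 100 * 60 + t % 100 - expected > 10 then answer
    else
      let check' := check + 1
      let answer' := if check' = 5 then answer + 1 else answer
      solInnerA' expected ts check' answer'

lemma weekdaysB_cons_skip (t : Int) (ts : List Int) (day : Int) (h : day = 6 ∨ day = 7) :
    weekdaysB (t :: ts) day = weekdaysB ts (day + 1) := by
  have hng : ¬ (day ≠ 6 ∧ day ≠ 7) := by tauto
  unfold weekdaysB
  rw [PySem.List.enumerate_cons]
  simp [hng]

lemma weekdaysB_cons_keep (t : Int) (ts : List Int) (day : Int) (h : ¬ (day = 6 ∨ day = 7)) :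
    weekdaysB (t :: ts) day = t :: weekdaysB ts (day + 1) := by
  have hg : day ≠ 6 ∧ day ≠ 7 := by tauto
  unfold weekdaysB
  rw [PySem.List.enumerate_cons]
  simp [hg]

lemma solInnerA_eq_filtered (expected : Int) (logs : List Int) (day check answer : Int) :
    solInnerA expected logs day check answer
      = solInnerA' expected (weekdaysB logs day) check answer := by
  induction logs generalizing day check answer with
  | nil => simp [solInnerA, weekdaysB, PySem.List.enumerate_nil, solInnerA']
  | cons t ts ih =>
    by_cases h : day = 6 ∨ day = 7
    · rw [weekdaysB_cons_skip t ts day h, ← ih]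
      simp [solInnerA, h]
    · rw [weekdaysB_cons_keep t ts day h]
      simp only [solInnerA, h, if_false, fd100, md100, solInnerA']
      by_cases hd : t / 100 * 60 + t % 100 - expected > 10
      · simp [hd]
      · simp [hd, ih]

-- once check ≥ 5 nothing more is ever added
lemma solInnerA'_ge5 (expected : Int) (ws : List Int) (check answer : Int)
    (h : 5 ≤ check) :
    solInnerA' expected ws check answer = answer := by
  induction ws generalizing check answer with
  | nil => simp [solInnerA']
  | cons t ts ih =>
    simp only [solInnerA']
    split
    · rfl
    · have h5 : ¬ (check + 1 = 5) := by omega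
      simp only [h5, if_false]
      exact ih (check + 1) answer (by omega)

def okB (expected t : Int) : Bool :=
  decide (t / 100 * 60 + t % 100 - expected ≤ 10)

lemma solInnerA'_spec (expected : Int) (ws : List Int) (k : Nat) (hk : k < 5) (answer : Int) :
    solInnerA' expected ws (k : Int) answer
      = answer + (if 5 - k ≤ ws.length ∧ (ws.take (5 - k)).all (okB expected) then 1 else 0) := by
  induction ws generalizing k answer with
  | nil =>
    have h0 : ¬ (5 - k = 0) := by omega
    simp [solInnerA', h0]
  | cons t ts ih =>
    simp only [solInnerA']
    by_cases hd : t / 100 * 60 + t % 100 - expected > 10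
    · have hok : okB expected t = false := by simp [okB]; omega
      have htake : 5 - k = (5 - k - 1) + 1 := by omega
      rw [htake]
      simp [hd, List.take_succ_cons, hok]
    · have hok : okB expected t = true := by simp [okB]; omega
      simp only [hd, if_false]
      by_cases h4 : k = 4
      · subst h4
        have h5 : ((4 : Nat) : Int) + 1 = 5 := by norm_num
        rw [h5]
        simp only [if_true]
        rw [solInnerA'_ge5 expected ts 5 (answer + 1) (by omega)]
        have htake : (5 : Nat) - 4 = 1 := by omega
        simp [htake, List.take_succ_cons, hok]
      · have h5 : ¬ (((k : Nat) : Int) + 1 = 5) := by omega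
        simp only [h5, if_false]
        have hcast : ((k : Nat) : Int) + 1 = ((k + 1 : Nat) : Int) := by push_cast; ring
        rw [hcast, ih (k + 1) (by omega) answer]
        have htake : 5 - k = (5 - (k + 1)) + 1 := by omega
        rw [htake]
        simp only [List.take_succ_cons, List.all_cons, hok, Bool.true_and, List.length_cons]
        congr 1
        simp

-- one person: A's inner loop from (day = startday, check = 0) equals the take-5/all test over weekdaysB
lemma person_eq (expected : Int) (logs : List Int) (startday answer : Int) :
    solInnerA expected logs startday 0 answer
      = (if 5 ≤ (weekdaysB logs startday).length ∧
            ((weekdaysB logs startday).take 5).all (fun t =>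
              PySem.Int.floordiv t 100 * 60 + PySem.Int.mod t 100 - expected ≤ 10)
         then answer + 1 else answer) := by
  rw [solInnerA_eq_filtered]
  have h := solInnerA'_spec expected (weekdaysB logs startday) 0 (by omega) answer
  simp only [Nat.cast_zero, Nat.sub_zero] at h
  rw [h]
  unfold okB
  simp only [fd100, md100]
  split <;> omega

-- fold over indices (with in-range lookups) equals fold over the zip
lemma foldl_range_eq_zip (s : List Int) (t : List (List Int)) (h : s.length ≤ t.length)
    (g : Int → Int → List Int → Int) (acc : Int) :
    (List.range s.length).foldl (fun answer i =>
        g answer ((PySem.List.pyGet? s (Int.ofNat i)).getD 0)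
          ((PySem.List.pyGet? t (Int.ofNat i)).getD [])) acc
      = (s.zip t).foldl (fun answer p => g answer p.1 p.2) acc := by
  induction s generalizing t acc with
  | nil => simp
  | cons x s' ih =>
    cases t with
    | nil => simp at h
    | cons y t' =>
      simp only [List.length_cons, List.range_succ_eq_map, List.foldl_cons, List.foldl_map,
        List.zip_cons_cons]
      have hx : (PySem.List.pyGet? (x :: s') (Int.ofNat 0)).getD 0 = x := by
        simp
      have hy : (PySem.List.pyGet? (y :: t') (Int.ofNat 0)).getD [] = y := by
        simp
      rw [hx, hy]
      refine Eq.trans (PySem.List.foldl_congr_mem _ _ _ _ ?_) (ih t' (by simpa using h) (g acc x y))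
      intro a i _
      simp [Nat.succ_eq_add_one]

-- ======== relating B's closed-form indices to weekdaysB ========

def Pnat (d : Int) (j : Nat) : Bool := decide ((j : Int) ≠ 6 - d ∧ (j : Int) ≠ 7 - d)
def Fn (d : Int) (n : Nat) : List Nat := (List.range n).filter (Pnat d)

-- weekdaysB is the map of the index filter
lemma weekdaysB_eq_map (logs : List Int) (d : Int) :
    weekdaysB logs d = (Fn d logs.length).map (fun j => logs.getD j 0) := by
  induction logs generalizing d with
  | nil => simp [weekdaysB, PySem.List.enumerate_nil, Fn]
  | cons t ts ih =>
    have hPs : ∀ j ∈ List.range ts.length, Pnat d (j + 1) = Pnat (d + 1) j := by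
      intro j _
      unfold Pnat
      have h1 : ((j + 1 : Nat) : Int) = 6 - d ↔ (j : Int) = 6 - (d + 1) := by push_cast; omega
      have h2 : ((j + 1 : Nat) : Int) = 7 - d ↔ (j : Int) = 7 - (d + 1) := by push_cast; omega
      by_cases ha : (j : Int) = 6 - (d + 1)
      · simp [h1.mpr ha, ha]
      · by_cases hb : (j : Int) = 7 - (d + 1)
        · simp [h2.mpr hb, hb]
        · have ha' := (not_iff_not.mpr h1).mpr ha
          have hb' := (not_iff_not.mpr h2).mpr hb
          simp_all
    have hfil : (List.range ts.length).filter (fun j => Pnat d (j + 1)) = Fn (d + 1) ts.length :=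
      List.filter_congr hPs
    have hrange : Fn d (ts.length + 1)
        = (if Pnat d 0 then [0] else []) ++ (Fn (d + 1) ts.length).map Nat.succ := by
      unfold Fn
      rw [List.range_succ_eq_map, List.filter_cons, List.filter_map]
      have hcomp : (List.range ts.length).filter (Pnat d ∘ Nat.succ)
          = (List.range ts.length).filter (Pnat (d + 1)) := by
        apply List.filter_congr
        intro j hj
        simpa using hPs j hj
      rw [hcomp]
      by_cases hp : Pnat d 0 = true <;> simp [hp]
    by_cases h : d = 6 ∨ d = 7
    · rw [weekdaysB_cons_skip t ts d h, ih (d + 1)]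
      have hP0 : Pnat d 0 = false := by
        unfold Pnat
        rcases h with h | h <;> subst h <;> simp <;> omega
      rw [List.length_cons, hrange, hP0]
      simp only [Bool.false_eq_true, if_false, List.nil_append, List.map_map]
      apply List.map_congr_left
      intro j _
      simp [Function.comp]
    · rw [weekdaysB_cons_keep t ts d h, ih (d + 1)]
      have hP0 : Pnat d 0 = true := by
        unfold Pnat
        push_neg at h
        have h1 : ((0 : Nat) : Int) ≠ 6 - d := by push_cast; omega
        have h2 : ((0 : Nat) : Int) ≠ 7 - d := by push_cast; omega
        simp only [decide_eq_true_eq]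
        exact ⟨h1, h2⟩
      rw [List.length_cons, hrange, hP0]
      simp only [if_true, List.cons_append, List.nil_append, List.map_cons, List.map_map,
        List.getD_cons_zero]
      congr 1 <;>
      · apply List.map_congr_left
        intro j _
        simp [Function.comp]

lemma filter_lt_range (m n : Nat) (h : n ≤ m) :
    (List.range m).filter (fun j => decide (j < n)) = List.range n := by
  induction m with
  | zero => have : n = 0 := by omega
            subst this; rfl
  | succ m ih =>
    by_cases hm : n = m + 1
    · subst hm
      apply List.filter_eq_self.mpr
      intro a ha
      simp [List.mem_range.mp ha]
    · have hn : n ≤ m := by omega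
      rw [List.range_succ, List.filter_append, ih hn]
      have : ¬ m < n := by omega
      simp [this]

lemma Fn_prefix (d : Int) (n : Nat) (h : n ≤ 7) :
    Fn d n = (Fn d 7).filter (fun j => decide (j < n)) := by
  unfold Fn
  rw [List.filter_filter, ← filter_lt_range 7 n h, List.filter_filter]
  apply List.filter_congr
  intro j _
  simp [Bool.and_comm]

lemma Fn_suffix (d : Int) (n : Nat) (h : 7 ≤ n) :
    ∃ t, Fn d n = Fn d 7 ++ t := by
  obtain ⟨m, rfl⟩ : ∃ m, n = 7 + m := ⟨n - 7, by omega⟩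
  exact ⟨_, by unfold Fn; rw [List.range_add, List.filter_append]⟩

lemma filter_split_len {α : Type} (l : List α) (p : α → Bool) :
    (l.filter p).length + (l.filter (fun x => !(p x))).length = l.length := by
  induction l with
  | nil => rfl
  | cons x xs ih =>
    by_cases h : p x <;> simp [List.filter_cons, h, ← ih] <;> omega

lemma nodup_pair_len {α : Type} (l : List α) (a b : α) (hn : l.Nodup)
    (hs : ∀ x ∈ l, x = a ∨ x = b) : l.length ≤ 2 := by
  match l with
  | [] => simp
  | [x] => simp
  | [x, y] => simp
  | x :: y :: z :: t =>
    exfalso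
    simp only [List.nodup_cons, List.mem_cons] at hn
    rcases hs x (by simp) with hx | hx <;> rcases hs y (by simp) with hy | hy <;>
      rcases hs z (by simp) with hz | hz <;> simp_all

lemma Fn7_len (d : Int) : 5 ≤ (Fn d 7).length := by
  have hsplit := filter_split_len (List.range 7) (Pnat d)
  have hbad : ((List.range 7).filter (fun j => !(Pnat d j))).length ≤ 2 := by
    set bad := (List.range 7).filter (fun j => !(Pnat d j)) with hb
    have hnd : bad.Nodup := (List.nodup_range).filter _
    have hmem : ∀ x ∈ bad.map (fun j : Nat => (j : Int)), x = 6 - d ∨ x = 7 - d := by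
      intro x hx
      obtain ⟨j, hj, rfl⟩ := List.mem_map.mp hx
      have := List.of_mem_filter hj
      unfold Pnat at this
      by_cases h1 : (j : Int) = 6 - d
      · exact Or.inl h1
      · by_cases h2 : (j : Int) = 7 - d
        · exact Or.inr h2
        · simp [h1, h2] at this
    have hndm : (bad.map (fun j : Nat => (j : Int))).Nodup :=
      hnd.map (fun a b => by exact_mod_cast id)
    have := nodup_pair_len _ _ _ hndm hmem
    simpa using this
  have h7 : (List.range 7).length = 7 := List.length_range
  have hFn : Fn d 7 = (List.range 7).filter (Pnat d) := rfl
  rw [hFn]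
  omega

lemma Fn7_sorted (d : Int) : (Fn d 7).Pairwise (· < ·) :=
  List.pairwise_lt_range.sublist List.filter_sublist

-- the five indices and their last element
def idx5 (d : Int) : List Nat := (Fn d 7).take 5
def e4 (d : Int) : Nat := (idx5 d).getD 4 0

lemma idx5_len (d : Int) : (idx5 d).length = 5 := by
  unfold idx5
  rw [List.length_take]
  have := Fn7_len d
  omega

lemma idx5_sorted (d : Int) : (idx5 d).Pairwise (· < ·) :=
  (Fn7_sorted d).sublist (List.take_sublist _ _)

lemma e4_getElem (d : Int) (h : 4 < (idx5 d).length) : e4 d = (idx5 d)[4] := by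
  unfold e4
  exact List.getD_eq_getElem _ _ h

lemma mem_idx5_le (d : Int) (a : Nat) (ha : a ∈ idx5 d) : a ≤ e4 d := by
  have hlen := idx5_len d
  obtain ⟨i, hi, rfl⟩ := List.mem_iff_getElem.mp ha
  rw [e4_getElem d (by omega)]
  by_cases h4 : i = 4
  · subst h4; exact le_refl _
  · have := (List.pairwise_iff_getElem.mp (idx5_sorted d)) i 4 hi (by omega) (by omega)
    omega

lemma e4_mem (d : Int) : e4 d ∈ idx5 d := by
  rw [e4_getElem d (by rw [idx5_len]; omega)]
  exact List.getElem_mem _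

lemma e4_lt_7 (d : Int) : e4 d < 7 := by
  have h1 : e4 d ∈ Fn d 7 := List.mem_of_mem_take (e4_mem d)
  have h2 : e4 d ∈ List.range 7 := List.mem_of_mem_filter h1
  exact List.mem_range.mp h2

lemma rest_gt (d : Int) (b : Nat) (hb : b ∈ (Fn d 7).drop 5) : e4 d < b := by
  have hsp := List.take_append_drop 5 (Fn d 7)
  have hpw : ((Fn d 7).take 5 ++ (Fn d 7).drop 5).Pairwise (· < ·) := by
    rw [hsp]; exact Fn7_sorted d
  exact (List.pairwise_append.mp hpw).2.2 _ (e4_mem d) _ hb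

-- β : when e4 < n, the first five filtered indices are exactly idx5
lemma take5_Fn (d : Int) (n : Nat) (h : e4 d < n) : (Fn d n).take 5 = idx5 d := by
  have hlen := idx5_len d
  by_cases h7 : n ≤ 7
  · rw [Fn_prefix d n h7]
    have hsp : Fn d 7 = idx5 d ++ (Fn d 7).drop 5 := (List.take_append_drop 5 _).symm
    rw [hsp, List.filter_append]
    have hkeep : (idx5 d).filter (fun j => decide (j < n)) = idx5 d := by
      apply List.filter_eq_self.mpr
      intro a ha
      have := mem_idx5_le d a ha
      simp; omega
    rw [hkeep, List.take_append, hlen]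
    simp [List.take_of_length_le (le_of_eq hlen)]
  · obtain ⟨t, ht⟩ := Fn_suffix d n (by omega)
    have hsp : Fn d 7 = idx5 d ++ (Fn d 7).drop 5 := (List.take_append_drop 5 _).symm
    rw [ht, hsp, List.append_assoc, List.take_append, hlen]
    simp [List.take_of_length_le (le_of_eq hlen)]

-- α : five weekday entries exist iff the fifth index is in range
lemma five_le_iff (d : Int) (n : Nat) : 5 ≤ (Fn d n).length ↔ e4 d < n := by
  constructor
  · intro h
    by_contra hc
    push_neg at hc
    have h7 : n ≤ 7 := by have := e4_lt_7 d; omega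
    rw [Fn_prefix d n h7] at h
    have hsp : Fn d 7 = idx5 d ++ (Fn d 7).drop 5 := (List.take_append_drop 5 _).symm
    rw [hsp, List.filter_append] at h
    have hrest : ((Fn d 7).drop 5).filter (fun j => decide (j < n)) = [] := by
      apply List.filter_eq_nil_iff.mpr
      intro b hb
      have := rest_gt d b hb
      simp; omega
    have hlt : ((idx5 d).filter (fun j => decide (j < n))).length < (idx5 d).length := by
      apply List.length_filter_lt_length_iff_exists.mpr
      exact ⟨e4 d, e4_mem d, by simp; omega⟩
    rw [hrest] at h
    simp only [List.length_append, List.length_nil] at h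
    rw [idx5_len] at hlt
    omega
  · intro h
    have := take5_Fn d n h
    have : ((Fn d n).take 5).length = 5 := by rw [this, idx5_len]
    rw [List.length_take] at this
    omega

-- B's literal index list is the cast of idx5
lemma weekdayIdxs_eq (d : Int) : weekdayIdxs d = (idx5 d).map (fun j : Nat => (j : Int)) := by
  unfold weekdayIdxs idx5 Fn
  rw [show PySem.List.pyRange 0 7 1 = ([0, 1, 2, 3, 4, 5, 6] : List Int) from by decide]
  rw [show ([0, 1, 2, 3, 4, 5, 6] : List Int)
        = ([0, 1, 2, 3, 4, 5, 6] : List Nat).map (fun j : Nat => (j : Int)) from by decide]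
  rw [show List.range 7 = ([0, 1, 2, 3, 4, 5, 6] : List Nat) from by decide]
  rw [List.filter_map, List.map_take]
  have hp : ((fun j : Int => decide (j ≠ 6 - d ∧ j ≠ 7 - d)) ∘ fun j : Nat => (j : Int)) = Pnat d := by
    funext j
    rfl
  rw [hp]

lemma weekdayIdxs_last (d : Int) :
    (PySem.List.pyGet? (weekdayIdxs d) (-1)).getD 0 = ((e4 d : Nat) : Int) := by
  rw [PySem.List.pyGet?_neg_one, weekdayIdxs_eq]
  have hlen := idx5_len d
  have h4 : 4 < (idx5 d).length := by omega
  rw [List.getLast?_eq_getElem?]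
  simp only [List.length_map]
  rw [hlen]
  rw [List.getElem?_map]
  rw [List.getElem?_eq_getElem (by omega : 4 < (idx5 d).length)]
  simp [e4_getElem d h4]

-- per person: B's closed-form five-index test equals the weekdaysB take-5/all test
lemma personB (logs : List Int) (d expected answer : Int) :
    (if (PySem.List.pyGet? (weekdayIdxs d) (-1)).getD 0 ≥ (logs.length : Int) then answer
     else if (weekdayIdxs d).all (fun j =>
          decide (PySem.Int.floordiv ((PySem.List.pyGet? logs j).getD 0) 100 * 60
            + PySem.Int.mod ((PySem.List.pyGet? logs j).getD 0) 100 - expected ≤ 10))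
       then answer + 1 else answer)
    = (if 5 ≤ (weekdaysB logs d).length ∧
          ((weekdaysB logs d).take 5).all (fun t =>
            PySem.Int.floordiv t 100 * 60 + PySem.Int.mod t 100 - expected ≤ 10)
       then answer + 1 else answer) := by
  rw [weekdayIdxs_last, weekdaysB_eq_map]
  by_cases h : e4 d < logs.length
  · have hge : ¬ (((e4 d : Nat) : Int) ≥ (logs.length : Int)) := by
      push_neg; exact_mod_cast h
    rw [if_neg hge]
    have hcond : 5 ≤ ((Fn d logs.length).map (fun j => logs.getD j 0)).length := by
      rw [List.length_map]; exact (five_le_iff d logs.length).mpr h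
    rw [← List.map_take, take5_Fn d logs.length h]
    have hall : (weekdayIdxs d).all (fun j =>
          decide (PySem.Int.floordiv ((PySem.List.pyGet? logs j).getD 0) 100 * 60
            + PySem.Int.mod ((PySem.List.pyGet? logs j).getD 0) 100 - expected ≤ 10))
        = ((idx5 d).map (fun j => logs.getD j 0)).all (fun t =>
            decide (PySem.Int.floordiv t 100 * 60 + PySem.Int.mod t 100 - expected ≤ 10)) := by
      rw [weekdayIdxs_eq, List.all_map, List.all_map]
      congr 1
      funext j
      simp [Function.comp, PySem.List.pyGet?_natCast, List.getD_eq_getElem?_getD]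
    rw [hall]
    simp only [hcond, true_and]
  · have hge : ((e4 d : Nat) : Int) ≥ (logs.length : Int) := by
      exact_mod_cast not_lt.mp h
    rw [if_pos hge]
    have hcond : ¬ (5 ≤ ((Fn d logs.length).map (fun j => logs.getD j 0)).length) := by
      rw [List.length_map]
      intro hc
      exact h ((five_le_iff d logs.length).mp hc)
    have hnot : ¬ (5 ≤ ((Fn d logs.length).map (fun j => logs.getD j 0)).length ∧
          (((Fn d logs.length).map (fun j => logs.getD j 0)).take 5).all (fun t =>
            PySem.Int.floordiv t 100 * 60 + PySem.Int.mod t 100 - expected ≤ 10)) :=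
      fun hC => hcond hC.1
    rw [if_neg hnot]

-- ===== VERDICT (by name: the statement is the Claim_ definition above) =====
theorem solution_spec : Claim_equal_solution := by
  intro schedules timelogs startday _hdom hpre
  unfold Spec_solution solution solution_alt
  rw [foldl_range_eq_zip schedules timelogs hpre
    (fun answer s logs =>
      solInnerA (PySem.Int.floordiv s 100 * 60 + PySem.Int.mod s 100) logs startday 0 answer) 0]
  apply PySem.List.foldl_congr_mem
  intro a p _
  rw [person_eq]
  exact (personB p.2 startday _ a).symm
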